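-- pv_equiv track=rewrite | github.com/KMORaza/leetcode-solutions | LeetCode Solutions/1643.py | kthSmallestPath
-- ===== SOURCE A (Python) =====
-- from math import comb
-- from typing import List
--
-- def kthSmallestPath(destination: List[int], k: int) -> str:
--     d, h = destination
--     path = []
--     while d > 0 or h > 0:
--         if d == 0:
--             path.append('H')
--             h -= 1
--         elif h == 0:
--             path.append('V')
--             d -= 1
--         else:
--             paths_with_H = comb(d + h - 1, d)
--             if k <= paths_with_H:
--                 path.append('H')
--                 h -= 1
--             else:
--                 path.append('V')
--                 k -= paths_with_H
--                 d -= 1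
--     return ''.join(path)
-- ===== SOURCE B (Python) =====
-- from math import comb
--
-- def kthSmallestPath(destination, k):
--     # Combinatorial number system: unrank m = k-1 directly into the
--     # from-the-right positions of the d V-moves, then render the string.
--     d, h = destination
--     n = d + h
--     m = k - 1
--     res = ['H'] * n
--     prev = n
--     for i in range(d, 0, -1):
--         # largest c < prev with comb(c, i) <= m (floor at c = i - 1)
--         c = prev - 1
--         while c > i - 1 and comb(c, i) > m:
--             c -= 1
--         m -= comb(c, i)
--         res[n - 1 - c] = 'V'
--         prev = c
--     return ''.join(res)
-- ===== Notes on version B (the rewrite author's own statement) =====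
-- stated objective: alternative
-- what changed: B unranks m = k-1 in the combinatorial number system: for i = d..1 it finds the largest position c with comb(c,i) <= m, subtracts comb(c,i), and writes a 'V' into an all-'H' buffer at that from-right position, instead of A's greedy per-character loop comparing k against comb(d+h-1,d) at every position.
import Mathlib
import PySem

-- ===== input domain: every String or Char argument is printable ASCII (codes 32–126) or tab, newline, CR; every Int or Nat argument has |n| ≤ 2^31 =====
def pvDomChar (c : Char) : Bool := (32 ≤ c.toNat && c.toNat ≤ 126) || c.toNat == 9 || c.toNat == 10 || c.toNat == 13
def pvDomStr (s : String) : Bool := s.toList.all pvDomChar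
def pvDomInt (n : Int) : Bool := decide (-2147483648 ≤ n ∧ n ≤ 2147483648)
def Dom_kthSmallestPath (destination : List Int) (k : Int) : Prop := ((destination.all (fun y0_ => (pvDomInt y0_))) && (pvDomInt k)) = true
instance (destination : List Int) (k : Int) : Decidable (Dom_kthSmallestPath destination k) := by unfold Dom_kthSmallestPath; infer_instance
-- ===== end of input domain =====

-- B unranks m = k-1 in the combinatorial number system, computing the from-right positions of the
-- d V-moves directly and writing them into an all-H buffer, instead of A's per-character greedy
-- decision loop; same result, similar cost ("alternative").

-- ===== PORT A =====

-- math.comb for nonnegative arguments (Python raises on a negative argument; inside Pre_ both arguments are nonnegative)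
def pyComb (n r : Int) : Int := ((n.toNat.choose r.toNat : Nat) : Int)

-- A's while loop; fuel only makes the recursion total (inside Pre_ the loop runs at most (d+h).toNat times)
def loopA (k d h : Int) (acc : List Char) (fuel : Nat) : List Char :=
  match fuel with
  | 0 => acc
  | fuel + 1 =>
    if 0 < d ∨ 0 < h then
      if d = 0 then loopA k d (h - 1) (acc ++ ['H']) fuel
      else if h = 0 then loopA k (d - 1) h (acc ++ ['V']) fuel
      else
        let c := pyComb (d + h - 1) d
        if k ≤ c then loopA k d (h - 1) (acc ++ ['H']) fuel
        else loopA (k - c) (d - 1) h (acc ++ ['V']) fuel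
    else acc

def kthSmallestPath (destination : List Int) (k : Int) : String :=
  match destination with
  | [d, h] => String.ofList (loopA k d h [] (d + h).toNat)
  | _ => ""   -- unreachable inside Pre_ (Python unpacking raises)

-- ===== PORT B =====

-- math.comb again, on B's side (ports share no definitions)
def pyCombB (c : Int) (i : Nat) : Int := (Nat.choose c.toNat i : Int)

-- B's inner while: scan c downward while c > i-1 and comb(c,i) > m; fuel only makes it total
-- (the loop decrements c and stops at c = i-1 at the latest, so (start - (i-1)).toNat steps suffice)
def scanB (i : Nat) (m : Int) (c : Int) (fuel : Nat) : Int :=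
  match fuel with
  | 0 => c
  | fuel + 1 => if (i : Int) - 1 < c ∧ m < pyCombB c i then scanB i m (c - 1) fuel else c

-- B's for-loop over i = d, d-1, …, 1; res[n-1-c] = 'V' is exact inside Pre_ (the index is then
-- provably nonnegative and in range, so Python neither wraps nor raises)
def loopB (n : Int) (i : Nat) (m prev : Int) (res : List Char) : List Char :=
  match i with
  | 0 => res
  | i + 1 =>
    let c := scanB (i + 1) m (prev - 1) ((prev - 1 - (i : Int)).toNat)
    loopB n i (m - pyCombB c (i + 1)) c (res.set (n - 1 - c).toNat 'V')

def kthSmallestPath_alt (destination : List Int) (k : Int) : String :=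
  -- 'd, h = destination': succeeds exactly on two-element lists (guaranteed by Pre_)
  if destination.length = 2 then
    let d := destination.getD 0 0
    let h := destination.getD 1 0
    String.ofList (loopB (d + h) d.toNat (k - 1) (d + h) (List.replicate (d + h).toNat 'H'))
  else ""

-- ===== PRECONDITION & SPEC =====
-- Pre_ admits exactly the inputs on which the Python A returns: a 2-element destination (otherwise
-- unpacking raises ValueError) whose components are not of mixed sign with the positive one driving
-- the loop (there A eventually calls math.comb on a negative argument, which raises ValueError).
def Pre_kthSmallestPath (destination : List Int) (k : Int) : Prop :=
  destination.length = 2 ∧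
    ((0 ≤ destination.getD 0 0 ∧ 0 ≤ destination.getD 1 0) ∨
     (destination.getD 0 0 ≤ 0 ∧ destination.getD 1 0 ≤ 0))
instance (destination : List Int) (k : Int) : Decidable (Pre_kthSmallestPath destination k) := by
  unfold Pre_kthSmallestPath; infer_instance

def pvWitness_kthSmallestPath : List Int × Int := ([2, 3], 4)

def Spec_kthSmallestPath (destination : List Int) (k : Int) (out : String) : Prop := out = kthSmallestPath_alt destination k
instance (destination : List Int) (k : Int) (out : String) : Decidable (Spec_kthSmallestPath destination k out) := by unfold Spec_kthSmallestPath; infer_instance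

-- ===== CLAIM (what is proved, stated in full; the proofs are below) =====
def Claim_equal_kthSmallestPath : Prop := ∀ (destination : List Int) (k : Int), Dom_kthSmallestPath destination k → Pre_kthSmallestPath destination k → Spec_kthSmallestPath destination k (kthSmallestPath destination k)

-- ===== LEMMAS AND PROOFS =====

-- the scan never increases c
theorem scanB_le (fuel : Nat) : ∀ (i : Nat) (m c : Int), scanB i m c fuel ≤ c := by
  induction fuel with
  | zero => intro i m c; simp [scanB]
  | succ f ih =>
    intro i m c
    simp only [scanB]
    split
    · exact le_trans (ih i m (c - 1)) (by omega)
    · exact le_refl c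

-- the scan never drops below i-1
theorem scanB_ge (fuel : Nat) : ∀ (i : Nat) (m c : Int), (i : Int) - 1 ≤ c → (i : Int) - 1 ≤ scanB i m c fuel := by
  induction fuel with
  | zero => intro i m c hc; simpa [scanB] using hc
  | succ f ih =>
    intro i m c hc
    simp only [scanB]
    split
    · next hcond => exact ih i m (c - 1) (by omega)
    · exact hc

-- if the while-condition fails at c, the scan returns c immediately (any fuel)
theorem scanB_stop (fuel : Nat) (i : Nat) (m c : Int) (h : ¬ ((i : Int) - 1 < c ∧ m < pyCombB c i)) :
    scanB i m c fuel = c := by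
  cases fuel with
  | zero => simp [scanB]
  | succ f => simp only [scanB]; rw [if_neg h]

-- recursive characterization of B's result: the string (of length prev) that B's remaining
-- i iterations produce below position prev
def Rspec (i : Nat) (m prev : Int) : List Char :=
  match i with
  | 0 => List.replicate prev.toNat 'H'
  | i + 1 =>
    let c := scanB (i + 1) m (prev - 1) ((prev - 1 - (i : Int)).toNat)
    List.replicate (prev - 1 - c).toNat 'H' ++ 'V' :: Rspec i (m - pyCombB c (i + 1)) c

-- setting one cell of a replicate splits it
theorem set_replicate (p q : Nat) (a b : Char) (h : q < p) :
    (List.replicate p a).set q b = List.replicate q a ++ b :: List.replicate (p - q - 1) a := by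
  have hsplit : List.replicate p a = List.replicate q a ++ a :: List.replicate (p - q - 1) a := by
    have h1 : a :: List.replicate (p - q - 1) a = List.replicate (p - q) a := by
      rw [← List.replicate_succ]; congr 1; omega
    rw [h1, List.replicate_append_replicate]; congr 1; omega
  rw [hsplit, List.set_append_right _ _ (by simp), List.length_replicate]
  simp

-- A with h = 0 emits the d remaining V's
theorem loopA_h_zero (n : Nat) : ∀ (k d : Int) (acc : List Char), 0 ≤ d → d.toNat = n →
    loopA k d 0 acc n = acc ++ List.replicate n 'V' := by
  induction n with
  | zero => intro k d acc hd hn; simp [loopA]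
  | succ m ih =>
    intro k d acc hd hn
    have hdpos : 0 < d := by omega
    have hdne : d ≠ 0 := by omega
    simp only [loopA, if_pos (Or.inl hdpos), if_neg hdne]
    rw [ih k (d - 1) (acc ++ ['V']) (by omega) (by omega)]
    simp [List.replicate_succ]

-- A with d = 0 emits the h remaining H's
theorem loopA_d_zero (n : Nat) : ∀ (k h : Int) (acc : List Char), 0 ≤ h → h.toNat = n →
    loopA k 0 h acc n = acc ++ List.replicate n 'H' := by
  induction n with
  | zero => intro k h acc hh hn; simp [loopA]
  | succ m ih =>
    intro k h acc hh hn
    have hhpos : 0 < h := by omega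
    simp only [loopA, if_pos (Or.inr hhpos)]
    rw [ih k (h - 1) (acc ++ ['H']) (by omega) (by omega)]
    simp [List.replicate_succ]

-- Rspec with prev = i is forced: all remaining positions get V's
theorem Rspec_diag : ∀ (i : Nat) (m : Int), Rspec i m (i : Int) = List.replicate i 'V' := by
  intro i
  induction i with
  | zero => intro m; simp [Rspec]
  | succ j ih =>
    intro m
    simp only [Rspec]
    have hfuel : (((j + 1 : Nat) : Int) - 1 - (j : Int)).toNat = 0 := by push_cast; omega
    rw [hfuel]
    simp only [scanB]
    have h1 : (((j + 1 : Nat) : Int) - 1 - (((j + 1 : Nat) : Int) - 1)).toNat = 0 := by omega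
    have h2 : ((j + 1 : Nat) : Int) - 1 = (j : Int) := by push_cast; omega
    rw [h1, h2, ih]
    simp [List.replicate_succ]

-- the math: A's greedy left-to-right loop produces exactly the combinadic string of m = k-1
theorem loopA_eq_Rspec (N : Nat) : ∀ (d h k : Int) (acc : List Char), 0 ≤ d → 0 ≤ h → (d + h).toNat = N →
    loopA k d h acc N = acc ++ Rspec d.toNat (k - 1) (d + h) := by
  induction N with
  | zero =>
    intro d h k acc hd hh hN
    have hd0 : d = 0 := by omega
    have hh0 : h = 0 := by omega
    subst hd0; subst hh0
    simp [loopA, Rspec]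
  | succ N ih =>
    intro d h k acc hd hh hN
    by_cases hd0 : d = 0
    · subst hd0
      rw [loopA_d_zero (N + 1) k h acc hh (by omega)]
      have : (0 : Int) + h = ((N + 1 : Nat) : Int) := by push_cast; omega
      rw [this]
      simp [Rspec]
    · by_cases hh0 : h = 0
      · subst hh0
        rw [loopA_h_zero (N + 1) k d acc hd (by omega)]
        have h1 : d + 0 = ((d.toNat : Nat) : Int) := by omega
        rw [h1, Rspec_diag]
        have h2 : d.toNat = N + 1 := by omega
        rw [h2]
      · -- d > 0, h > 0
        have hdpos : 0 < d := by omega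
        have hhpos : 0 < h := by omega
        obtain ⟨j, hj⟩ : ∃ j, d.toNat = j + 1 := ⟨d.toNat - 1, by omega⟩
        have hjd : ((j : Int)) = d - 1 := by omega
        -- the combinadic count of strings starting with H at state (d, h)
        have hcomb : pyComb (d + h - 1) d = pyCombB (d + h - 1) (j + 1) := by
          simp only [pyComb, pyCombB]
          rw [hj]
        simp only [loopA, if_pos (Or.inl hdpos), if_neg hd0, if_neg hh0]
        by_cases hk : k ≤ pyComb (d + h - 1) d
        · -- A appends 'H'; the scan in Rspec steps once
          rw [if_pos hk, ih d (h - 1) k (acc ++ ['H']) hd (by omega) (by omega)]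
          have hgoal : Rspec d.toNat (k - 1) (d + h) = 'H' :: Rspec d.toNat (k - 1) (d + (h - 1)) := by
            rw [hj]
            simp only [Rspec]
            have hfuel : (d + h - 1 - (j : Int)).toNat = (d + (h - 1) - 1 - (j : Int)).toNat + 1 := by omega
            rw [hfuel]
            simp only [scanB]
            have hcond : ((j + 1 : Nat) : Int) - 1 < d + h - 1 ∧ k - 1 < pyCombB (d + h - 1) (j + 1) := by
              constructor
              · push_cast; omega
              · rw [← hcomb]; omega
            rw [if_pos hcond]
            have harg : d + h - 1 - 1 = d + (h - 1) - 1 := by ring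
            rw [harg]
            have hle := scanB_le ((d + (h - 1) - 1 - (j : Int)).toNat) (j + 1) (k - 1) (d + (h - 1) - 1)
            set c := scanB (j + 1) (k - 1) (d + (h - 1) - 1) ((d + (h - 1) - 1 - (j : Int)).toNat) with hc
            have hrep : (d + h - 1 - c).toNat = (d + (h - 1) - 1 - c).toNat + 1 := by omega
            rw [hrep, List.replicate_succ]
            simp
          rw [hgoal]
          simp
        · -- A appends 'V'; the scan in Rspec stops immediately at c = d + h - 1
          rw [if_neg hk, ih (d - 1) h (k - pyComb (d + h - 1) d) (acc ++ ['V']) (by omega) hh (by omega)]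
          have hgoal : Rspec d.toNat (k - 1) (d + h) =
              'V' :: Rspec (d - 1).toNat (k - pyComb (d + h - 1) d - 1) (d - 1 + h) := by
            rw [hj]
            simp only [Rspec]
            have hstop : scanB (j + 1) (k - 1) (d + h - 1) ((d + h - 1 - (j : Int)).toNat) = d + h - 1 := by
              apply scanB_stop
              intro hcond
              have := hcond.2
              rw [← hcomb] at this
              omega
            rw [hstop]
            have h1 : (d + h - 1 - (d + h - 1)).toNat = 0 := by omega
            rw [h1]
            have h2 : (d - 1).toNat = j := by omega
            have h3 : k - 1 - pyCombB (d + h - 1) (j + 1) = k - pyComb (d + h - 1) d - 1 := by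
              rw [← hcomb]; ring
            have h4 : d + h - 1 = d - 1 + h := by ring
            rw [h2, h3, h4]
            simp
          rw [hgoal]
          simp

-- the render: B's in-place writes into the all-H buffer realize Rspec
theorem loopB_eq_Rspec : ∀ (i : Nat) (m prev n : Int) (pre : List Char),
    0 ≤ prev → (i : Int) ≤ prev → prev ≤ n → pre.length = (n - prev).toNat →
    loopB n i m prev (pre ++ List.replicate prev.toNat 'H') = pre ++ Rspec i m prev := by
  intro i
  induction i with
  | zero => intro m prev n pre _ _ _ _; simp [loopB, Rspec]
  | succ j ih =>
    intro m prev n pre hprev hile hpn hpre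
    simp only [loopB, Rspec]
    set c := scanB (j + 1) m (prev - 1) ((prev - 1 - (j : Int)).toNat) with hc
    have hcle : c ≤ prev - 1 := scanB_le _ _ _ _
    have hcge : (j : Int) ≤ c := by
      have := scanB_ge ((prev - 1 - (j : Int)).toNat) (j + 1) m (prev - 1) (by push_cast; omega)
      push_cast at this; omega
    have hc0 : 0 ≤ c := by omega
    -- the write lands at offset pre.length + (prev - 1 - c).toNat
    have hidx : (n - 1 - c).toNat = pre.length + (prev - 1 - c).toNat := by
      rw [hpre]; omega
    have hset : (pre ++ List.replicate prev.toNat 'H').set (n - 1 - c).toNat 'V' =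
        (pre ++ List.replicate (prev - 1 - c).toNat 'H' ++ ['V']) ++ List.replicate c.toNat 'H' := by
      rw [hidx, List.set_append_right _ _ (by omega)]
      have : pre.length + (prev - 1 - c).toNat - pre.length = (prev - 1 - c).toNat := by omega
      rw [this, set_replicate _ _ _ _ (by omega)]
      have : prev.toNat - (prev - 1 - c).toNat - 1 = c.toNat := by omega
      rw [this]
      simp
    rw [hset, ih (m - pyCombB c (j + 1)) c n (pre ++ List.replicate (prev - 1 - c).toNat 'H' ++ ['V'])
      hc0 hcge (by omega) (by simp [hpre]; omega)]
    simp

-- ===== VERDICT (by name: the statement is the Claim_ definition above) =====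
theorem kthSmallestPath_spec : Claim_equal_kthSmallestPath := by
  intro destination k _ hpre
  obtain ⟨hlen, hsign⟩ := hpre
  match destination, hlen with
  | [d, h], _ =>
    simp only [List.getD, List.getElem?_cons_zero, List.getElem?_cons_succ, Option.getD_some] at hsign
    unfold Spec_kthSmallestPath kthSmallestPath kthSmallestPath_alt
    simp only [List.length_cons, List.length_nil, List.getD, List.getElem?_cons_zero,
      List.getElem?_cons_succ, Option.getD_some, if_pos]
    change String.ofList (loopA k d h [] (d + h).toNat) =
      String.ofList (loopB (d + h) d.toNat (k - 1) (d + h) (List.replicate (d + h).toNat 'H'))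
    rcases hsign with ⟨hd, hh⟩ | ⟨hd, hh⟩
    · rw [loopA_eq_Rspec (d + h).toNat d h k [] hd hh rfl]
      have := loopB_eq_Rspec d.toNat (k - 1) (d + h) (d + h) [] (by omega) (by omega) le_rfl (by simp)
      simp only [List.nil_append] at this ⊢
      rw [this]
    · -- both nonpositive: A's loop never runs, B's loop count d.toNat = 0
      have hA : loopA k d h [] (d + h).toNat = [] := by
        have : (d + h).toNat = 0 := by omega
        rw [this]; simp [loopA]
      have hd0 : d.toNat = 0 := by omega
      have hn0 : (d + h).toNat = 0 := by omega
      rw [hA, hd0, hn0]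
      simp [loopB]
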